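-- pv_equiv track=rewrite | github.com/nyogendran/kanithan-ai | src/agents/math_verifier.py | _curriculum_lcm_division_steps
-- ===== SOURCE A (Python) =====
-- from typing import Optional
--
-- _PRIME_TRIAL = [2, 3, 5, 7, 11, 13, 17, 19, 23, 29, 31, 37, 41, 43, 47]
--
-- def _curriculum_lcm_division_steps(nums: list[int]) -> list[tuple[int, list[int]]]:
--     """
--     Curriculum-style LCM division ladder: repeat until all rows are 1.
--     Each step: prefer smallest prime p that divides at least *two* numbers.
--     If none, use smallest p that divides exactly one number > 1 (e.g. 4 in 1,4,1).
--     """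
--     n = list(nums)
--     steps: list[tuple[int, list[int]]] = []
--     while any(x > 1 for x in n):
--         chosen_p: Optional[int] = None
--         for p in _PRIME_TRIAL:
--             if p > max(n):
--                 break
--             div_idx = [i for i, x in enumerate(n) if x % p == 0]
--             if len(div_idx) >= 2:
--                 chosen_p = p
--                 break
--         if chosen_p is None:
--             for p in _PRIME_TRIAL:
--                 if p > max(n):
--                     break
--                 div_idx = [i for i, x in enumerate(n) if x % p == 0]
--                 if len(div_idx) == 1 and n[div_idx[0]] > 1:
--                     chosen_p = p
--                     break
--         if chosen_p is None:
--             break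
--         p = chosen_p
--         n = [x // p if x % p == 0 else x for x in n]
--         steps.append((p, list(n)))
--     return steps
-- ===== SOURCE B (Python) =====
-- _PRIME_TRIAL = [2, 3, 5, 7, 11, 13, 17, 19, 23, 29, 31, 37, 41, 43, 47]
--
-- def _choose_prime(n):
--     """One scan over trial primes: break at the first prime dividing >= 2 entries,
--     remembering the first prime whose single divisible entry is > 1 as fallback."""
--     m = max(n)
--     single = None
--     for p in _PRIME_TRIAL:
--         if p > m:
--             break
--         c = 0
--         lone = 0
--         for x in n:
--             if x % p == 0:
--                 c += 1
--                 lone = x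
--         if c >= 2:
--             return p
--         if single is None and c == 1 and lone > 1:
--             single = p
--     return single
--
-- def _curriculum_lcm_division_steps(nums):
--     n = list(nums)
--     steps = []
--     while any(x > 1 for x in n):
--         p = _choose_prime(n)
--         if p is None:
--             break
--         n = [x // p if x % p == 0 else x for x in n]
--         steps.append((p, list(n)))
--     return steps
-- ===== Notes on version B (the rewrite author's own statement) =====
-- stated objective: simpler
-- what changed: A's two separate prime scans per step (pair scan, then a full single-divisor rescan) are replaced by one helper that scans the primes once, counting divisors with a running counter+last-divisible accumulator and remembering the first single-divisor candidate, so the second pass and the index lists disappear.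
import Mathlib
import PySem

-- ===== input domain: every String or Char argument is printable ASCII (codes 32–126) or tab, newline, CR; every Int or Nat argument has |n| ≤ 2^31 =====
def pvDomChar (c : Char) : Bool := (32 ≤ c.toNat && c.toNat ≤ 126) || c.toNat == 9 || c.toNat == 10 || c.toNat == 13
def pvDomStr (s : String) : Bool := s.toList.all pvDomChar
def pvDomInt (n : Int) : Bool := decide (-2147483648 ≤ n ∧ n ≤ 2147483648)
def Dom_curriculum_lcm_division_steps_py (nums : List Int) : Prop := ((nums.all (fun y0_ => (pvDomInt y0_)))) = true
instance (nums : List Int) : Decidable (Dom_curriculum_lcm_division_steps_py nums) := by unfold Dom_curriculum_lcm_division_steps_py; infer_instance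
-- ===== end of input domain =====

-- B merges A's two prime scans per ladder step into one scan with a counter + last-divisible
-- accumulator that also remembers the first single-divisor fallback prime (objective: simpler).

-- the module constant _PRIME_TRIAL, shared by both Python files
def pTrial : List Int := [2, 3, 5, 7, 11, 13, 17, 19, 23, 29, 31, 37, 41, 43, 47]

-- max(n); both Pythons only call it on a non-empty list (the while-guard holds), so getD 0 is never read
def pyMax (n : List Int) : Int := (PySem.List.max? n (fun x => x)).getD 0

-- ===== PORT A =====
-- [i for i, x in enumerate(n) if x % p == 0]
def divIdx (n : List Int) (p : Int) : List Int :=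
  ((PySem.List.enumerate n).filter (fun ix => PySem.Int.mod ix.2 p == 0)).map (fun ix => ix.1)

-- A's first scan: smallest trial prime dividing at least two entries
def aScanPair : List Int → List Int → Option Int
  | [], _ => none
  | p :: ps, n =>
    if p > pyMax n then none
    else if 2 ≤ (divIdx n p).length then some p
    else aScanPair ps n

-- A's second scan: smallest trial prime dividing exactly one entry, that entry being > 1
def aScanSingle : List Int → List Int → Option Int
  | [], _ => none
  | p :: ps, n =>
    if p > pyMax n then none
    else if (divIdx n p).length = 1 ∧
            1 < (PySem.List.pyGet? n ((divIdx n p).headD 0)).getD 0 then some p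
    else aScanSingle ps n

-- A's while loop; fuel bounds the iteration count (each iteration divides some nonzero entry by
-- ≥ 2 on Pre_ inputs, so 32·len+1 never runs out there; Python's loop is unbounded and A
-- diverges exactly on the inputs Pre_ excludes)
def aLoop : Nat → List Int → List (Int × List Int)
  | 0, _ => []
  | f + 1, n =>
    if n.any (fun x => decide (1 < x)) then
      match (match aScanPair pTrial n with
             | some p => some p
             | none => aScanSingle pTrial n) with
      | none => []
      | some p =>
        let n2 := n.map (fun x => if PySem.Int.mod x p == 0 then PySem.Int.floordiv x p else x)
        (p, n2) :: aLoop f n2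
    else []

def curriculum_lcm_division_steps_py (nums : List Int) : List (Int × List Int) :=
  aLoop (32 * nums.length + 1) nums

-- ===== PORT B =====
-- the inner counting loop of _choose_prime: c, lone over n
def bStep (p : Int) (acc : Nat × Int) (x : Int) : Nat × Int :=
  if PySem.Int.mod x p == 0 then (acc.1 + 1, x) else acc

def bCount (n : List Int) (p : Int) : Nat × Int := n.foldl (bStep p) (0, 0)

-- the prime loop of _choose_prime, carrying the 'single' fallback
def bScan : List Int → Int → List Int → Option Int → Option Int
  | [], _, _, single => single
  | p :: ps, m, n, single =>
    if p > m then single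
    else if 2 ≤ (bCount n p).1 then some p
    else if single = none ∧ (bCount n p).1 = 1 ∧ 1 < (bCount n p).2 then bScan ps m n (some p)
    else bScan ps m n single

def bChoose (n : List Int) : Option Int := bScan pTrial (pyMax n) n none

-- B's while loop (same fuel bound as A's port; B's Python loop mirrors A's and terminates on Pre_)
def bLoop : Nat → List Int → List (Int × List Int)
  | 0, _ => []
  | f + 1, n =>
    if n.any (fun x => decide (1 < x)) then
      match bChoose n with
      | none => []
      | some p =>
        let n2 := n.map (fun x => if PySem.Int.mod x p == 0 then PySem.Int.floordiv x p else x)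
        (p, n2) :: bLoop f n2
    else []

def curriculum_lcm_division_steps_py_alt (nums : List Int) : List (Int × List Int) :=
  bLoop (32 * nums.length + 1) nums

-- ===== PRECONDITION & SPEC =====
-- Pre_ excludes exactly the inputs on which the Python A never returns: with at least two zeros
-- (zeros are divisible by every prime, so p=2 is always the 'pair' choice) and some entry > 1
-- that is not a power of two, the ladder reaches a state it can never change and loops forever.
-- (∃ k < 32 suffices because Dom bounds entries by 2^31.)
def Pre_curriculum_lcm_division_steps_py (nums : List Int) : Prop :=
  nums.count 0 ≤ 1 ∨ ∀ x ∈ nums, 1 < x → ∃ k ∈ Finset.range 32, x = 2 ^ k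
instance (nums : List Int) : Decidable (Pre_curriculum_lcm_division_steps_py nums) := by
  unfold Pre_curriculum_lcm_division_steps_py; infer_instance

def pvWitness_curriculum_lcm_division_steps_py : List Int := [0, 2, 9]

def Spec_curriculum_lcm_division_steps_py (nums : List Int) (out : List (Int × List Int)) : Prop := out = curriculum_lcm_division_steps_py_alt nums
instance (nums : List Int) (out : List (Int × List Int)) : Decidable (Spec_curriculum_lcm_division_steps_py nums out) := by unfold Spec_curriculum_lcm_division_steps_py; infer_instance

-- ===== CLAIM (what is proved, stated in full; the proofs are below) =====
def Claim_equal_curriculum_lcm_division_steps_py : Prop := ∀ (nums : List Int), Dom_curriculum_lcm_division_steps_py nums → Pre_curriculum_lcm_division_steps_py nums → Spec_curriculum_lcm_division_steps_py nums (curriculum_lcm_division_steps_py nums)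

-- ===== LEMMAS AND PROOFS =====

-- the divisibility test both ports use, as a Bool predicate on entries
def qdiv (p x : Int) : Bool := PySem.Int.mod x p == 0

theorem divIdx_eq (n : List Int) (p : Int) :
    divIdx n p = ((PySem.List.enumerate n).filter (fun ix => qdiv p ix.2)).map (fun ix => ix.1) :=
  rfl

theorem bStep_eq_pos (p x : Int) (acc : Nat × Int) (hx : qdiv p x = true) :
    bStep p acc x = (acc.1 + 1, x) := by
  unfold bStep; simp only [qdiv] at hx; rw [if_pos hx]

theorem bStep_eq_neg (p x : Int) (acc : Nat × Int) (hx : ¬ qdiv p x = true) :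
    bStep p acc x = acc := by
  unfold bStep; simp only [qdiv] at hx; rw [if_neg hx]

-- filtering enumerate by a predicate on the value, then dropping indices, is filtering the list
theorem filter_enumerate_map_snd (p : Int) :
    ∀ (n : List Int) (s : Int),
      (((PySem.List.enumerate n s).filter (fun ix => qdiv p ix.2)).map (fun ix => ix.2))
        = n.filter (qdiv p)
  | [], _ => rfl
  | x :: n, s => by
    simp only [PySem.List.enumerate_cons, List.filter_cons]
    by_cases h : qdiv p x = true
    · simp [h, filter_enumerate_map_snd p n (s + 1)]
    · simp [h, filter_enumerate_map_snd p n (s + 1)]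

theorem divIdx_length (n : List Int) (p : Int) :
    (divIdx n p).length = (n.filter (qdiv p)).length := by
  rw [divIdx_eq, List.length_map, ← filter_enumerate_map_snd p n 0, List.length_map]

-- bCount splits into a count and a running 'last divisible' fold
theorem bFold_fst (p : Int) :
    ∀ (n : List Int) (c : Nat) (l : Int),
      (n.foldl (bStep p) (c, l)).1 = c + (n.filter (qdiv p)).length
  | [], c, l => by simp
  | x :: n, c, l => by
    simp only [List.foldl, List.filter_cons]
    by_cases hx : qdiv p x = true
    · rw [bStep_eq_pos p x (c, l) hx, bFold_fst p n (c + 1) x]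
      simp only [hx, if_pos, List.length_cons]
      omega
    · rw [bStep_eq_neg p x (c, l) hx, bFold_fst p n c l]
      simp [hx]

theorem bFold_snd (p : Int) :
    ∀ (n : List Int) (c : Nat) (l : Int),
      (n.foldl (bStep p) (c, l)).2 = n.foldl (fun acc x => if qdiv p x then x else acc) l
  | [], _, _ => rfl
  | x :: n, c, l => by
    simp only [List.foldl]
    by_cases hx : qdiv p x = true
    · rw [bStep_eq_pos p x (c, l) hx, if_pos hx, bFold_snd p n (c + 1) x]
    · rw [bStep_eq_neg p x (c, l) hx, if_neg hx, bFold_snd p n c l]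

theorem bCount_fst (n : List Int) (p : Int) :
    (bCount n p).1 = (n.filter (qdiv p)).length := by
  unfold bCount; rw [bFold_fst p n 0 0, Nat.zero_add]

theorem bCount_snd (n : List Int) (p : Int) :
    (bCount n p).2 = n.foldl (fun acc x => if qdiv p x then x else acc) 0 := by
  unfold bCount; rw [bFold_snd p n 0 0]

theorem lone_of_filter_nil (p : Int) :
    ∀ (n : List Int) (l : Int), n.filter (qdiv p) = [] →
      n.foldl (fun acc x => if qdiv p x then x else acc) l = l
  | [], _, _ => rfl
  | x :: n, l, h => by
    by_cases hx : qdiv p x = true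
    · simp [hx] at h
    · simp only [List.foldl, if_neg hx]
      exact lone_of_filter_nil p n l (by simpa [List.filter_cons, hx] using h)

theorem lone_of_filter_single (p : Int) :
    ∀ (n : List Int) (l v : Int), n.filter (qdiv p) = [v] →
      n.foldl (fun acc x => if qdiv p x then x else acc) l = v
  | [], _, _, h => by simp at h
  | x :: n, l, v, h => by
    by_cases hx : qdiv p x = true
    · have h' : x = v ∧ n.filter (qdiv p) = [] := by
        simpa [List.filter_cons, hx] using h
      simp only [List.foldl, if_pos hx]
      rw [lone_of_filter_nil p n x h'.2]
      exact h'.1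
    · simp only [List.foldl, if_neg hx]
      exact lone_of_filter_single p n l v (by simpa [List.filter_cons, hx] using h)

-- when exactly one entry is divisible, A's n[div_idx[0]] is that entry
theorem single_case (n : List Int) (p : Int) (h : (divIdx n p).length = 1) :
    ∃ v, n.filter (qdiv p) = [v] ∧ (PySem.List.pyGet? n ((divIdx n p).headD 0)).getD 0 = v := by
  have hlen : ((PySem.List.enumerate n).filter (fun ix => qdiv p ix.2)).length = 1 := by
    rw [divIdx_eq, List.length_map] at h
    exact h
  obtain ⟨iv, hiv⟩ := List.length_eq_one_iff.mp hlen
  have hmem : iv ∈ PySem.List.enumerate n := by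
    have : iv ∈ (PySem.List.enumerate n).filter (fun ix => qdiv p ix.2) := by
      rw [hiv]; exact List.mem_singleton_self iv
    exact List.mem_of_mem_filter this
  obtain ⟨k, hk, hkv⟩ := (PySem.List.mem_enumerate_iff _ _ _).mp hmem
  refine ⟨iv.2, ?_, ?_⟩
  · rw [← filter_enumerate_map_snd p n 0]
    show ((PySem.List.enumerate n).filter (fun ix => qdiv p ix.2)).map (fun ix => ix.2) = [iv.2]
    rw [hiv]; rfl
  · have hhead : (divIdx n p).headD 0 = iv.1 := by
      show (((PySem.List.enumerate n).filter (fun ix => qdiv p ix.2)).map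
        (fun ix => ix.1)).headD 0 = iv.1
      rw [hiv]; rfl
    rw [hhead, hkv]
    simp only [Int.zero_add]
    rw [PySem.List.pyGet?_natCast]
    simp [List.getElem?_eq_getElem hk]

-- A's single-divisor condition coincides with B's counter condition
theorem cond_iff (n : List Int) (p : Int) :
    ((divIdx n p).length = 1 ∧ 1 < (PySem.List.pyGet? n ((divIdx n p).headD 0)).getD 0)
      ↔ ((bCount n p).1 = 1 ∧ 1 < (bCount n p).2) := by
  constructor
  · rintro ⟨h1, h2⟩
    obtain ⟨v, hf, hv⟩ := single_case n p h1
    constructor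
    · rw [bCount_fst, hf]; rfl
    · rw [bCount_snd, lone_of_filter_single p n 0 v hf]
      rwa [hv] at h2
  · rintro ⟨h1, h2⟩
    have hd1 : (divIdx n p).length = 1 := by
      rw [divIdx_length]
      rw [bCount_fst] at h1
      exact h1

    obtain ⟨v, hf, hv⟩ := single_case n p hd1
    refine ⟨hd1, ?_⟩
    rw [hv]
    rw [bCount_snd, lone_of_filter_single p n 0 v hf] at h2
    exact h2

theorem pair_iff (n : List Int) (p : Int) :
    2 ≤ (divIdx n p).length ↔ 2 ≤ (bCount n p).1 := by
  rw [divIdx_length, bCount_fst]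

-- B's merged scan computes: the pair prime if one exists, else the stored fallback, else A's
-- single-divisor scan
theorem scan_eq (n : List Int) :
    ∀ (ps : List Int) (single : Option Int),
      bScan ps (pyMax n) n single =
        match aScanPair ps n with
        | some p => some p
        | none => match single with
                  | some s => some s
                  | none => aScanSingle ps n
  | [], single => by cases single <;> rfl
  | p :: ps, single => by
    show bScan (p :: ps) (pyMax n) n single = _
    unfold bScan aScanPair aScanSingle
    by_cases hm : p > pyMax n
    · simp only [hm, if_pos]; cases single <;> rfl
    · simp only [hm, if_neg, not_false_iff]
      by_cases hp : 2 ≤ (bCount n p).1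
      · rw [if_pos hp, if_pos ((pair_iff n p).mpr hp)]
      · rw [if_neg hp, if_neg (fun h => hp ((pair_iff n p).mp h))]
        by_cases hs : (divIdx n p).length = 1 ∧
            1 < (PySem.List.pyGet? n ((divIdx n p).headD 0)).getD 0
        · have hb := (cond_iff n p).mp hs
          cases single with
          | none =>
            rw [if_pos ⟨rfl, hb⟩, if_pos hs, scan_eq n ps (some p)]
          | some s =>
            rw [if_neg (by simp), scan_eq n ps (some s)]
        · have hb : ¬ ((bCount n p).1 = 1 ∧ 1 < (bCount n p).2) :=
            fun h => hs ((cond_iff n p).mpr h)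
          rw [if_neg (fun h => hb h.2), if_neg hs, scan_eq n ps single]

theorem choose_eq (n : List Int) :
    bChoose n = match aScanPair pTrial n with
                | some p => some p
                | none => aScanSingle pTrial n := by
  unfold bChoose
  rw [scan_eq n pTrial none]

theorem loop_eq : ∀ (f : Nat) (n : List Int), aLoop f n = bLoop f n
  | 0, _ => rfl
  | f + 1, n => by
    unfold aLoop bLoop
    rw [← choose_eq n]
    by_cases hg : n.any (fun x => decide (1 < x)) = true
    · simp only [hg, if_pos]
      cases bChoose n with
      | none => rfl
      | some p => simp only [loop_eq f]
    · simp [hg]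

-- ===== VERDICT (by name: the statement is the Claim_ definition above) =====
theorem curriculum_lcm_division_steps_py_spec : Claim_equal_curriculum_lcm_division_steps_py := by
  intro nums _ _
  show curriculum_lcm_division_steps_py nums = curriculum_lcm_division_steps_py_alt nums
  exact loop_eq (32 * nums.length + 1) nums
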